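-- pv_equiv track=rewrite | github.com/vgcman16/OpenNXT | tools/protocol_946_debug_common.py | parse_callref_lines
-- ===== SOURCE A (Python) =====
-- def useful_log_lines(text: str) -> list[str]:
--     lines: list[str] = []
--     for raw_line in text.replace("\r\n", "\n").split("\n"):
--         line = raw_line.rstrip()
--         if not line:
--             continue
--         if line.startswith("INFO "):
--             continue
--         if line.startswith("Press any key"):
--             continue
--         lines.append(line)
--     return lines
--
-- def parse_callref_lines(text: str) -> list[str]:
--     lines = useful_log_lines(text)
--     filtered = [
--         line
--         for line in lines
--         if not line.startswith("Function:")
--         and not line.startswith("Target:")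
--         and "GhidraScript" not in line
--     ]
--     return filtered[:24]
-- ===== SOURCE B (Python) =====
-- def parse_callref_lines(text: str) -> list[str]:
--     result: list[str] = []
--     for raw_line in text.replace("\r\n", "\n").split("\n"):
--         line = raw_line.rstrip()
--         if (not line
--                 or line.startswith(("INFO ", "Press any key", "Function:", "Target:"))
--                 or "GhidraScript" in line):
--             continue
--         result.append(line)
--         if len(result) == 24:
--             break
--     return result
-- ===== Notes on version B (the rewrite author's own statement) =====
-- stated objective: simpler
-- what changed: Replaces the helper-plus-comprehension-plus-slice pipeline (build all useful lines, filter again, take 24) with one fused loop over the raw lines that applies the combined predicate and stops as soon as 24 lines are kept.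
import Mathlib
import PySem

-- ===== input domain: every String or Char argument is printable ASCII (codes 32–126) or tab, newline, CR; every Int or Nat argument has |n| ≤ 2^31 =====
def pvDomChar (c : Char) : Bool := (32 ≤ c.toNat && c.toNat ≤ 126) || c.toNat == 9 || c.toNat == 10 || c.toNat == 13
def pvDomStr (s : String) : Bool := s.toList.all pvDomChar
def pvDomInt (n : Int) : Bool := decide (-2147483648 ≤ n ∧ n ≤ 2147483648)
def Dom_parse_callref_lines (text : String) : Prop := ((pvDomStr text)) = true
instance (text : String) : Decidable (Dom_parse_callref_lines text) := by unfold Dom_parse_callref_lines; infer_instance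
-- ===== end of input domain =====

-- B fuses A's two filtering passes and the [:24] slice into one loop with early exit at 24 kept lines (simpler; same result).

-- ===== PORT A =====
-- text.split("\n") is ported as (PySem.Str.split? … "\n").getD []: split? is `some` since the separator is non-empty.
def useful_log_lines (text : String) : List String :=
  ((PySem.Str.split? (PySem.Str.replace text "\r\n" "\n") "\n").getD []).foldl
    (fun lines raw_line =>
      let line := PySem.Str.rstrip raw_line
      if line == "" then lines
      else if PySem.Str.startswith line "INFO " then lines
      else if PySem.Str.startswith line "Press any key" then lines
      else lines ++ [line]) []

def parse_callref_lines (text : String) : List String :=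
  let lines := useful_log_lines text
  let filtered := lines.filter (fun line =>
    !(PySem.Str.startswith line "Function:") &&
    !(PySem.Str.startswith line "Target:") &&
    !(PySem.Str.isIn "GhidraScript" line))
  PySem.List.slice filtered none (some 24)

-- ===== PORT B =====
-- skip test of Source B's single loop (empty after rstrip, any of the prefixes, or contains "GhidraScript")
def pvSkip (line : String) : Bool :=
  line == "" || PySem.Str.startswith line "INFO " || PySem.Str.startswith line "Press any key"
    || PySem.Str.startswith line "Function:" || PySem.Str.startswith line "Target:"
    || PySem.Str.isIn "GhidraScript" line

-- Source B's loop: k = 24 - len(result) remaining slots; break (stop) when the 24th line is appended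
def pvCollect (lines : List String) (k : Nat) : List String :=
  match lines with
  | [] => []
  | raw_line :: rest =>
    let line := PySem.Str.rstrip raw_line
    if pvSkip line then pvCollect rest k
    else if k = 1 then [line] else line :: pvCollect rest (k - 1)

def parse_callref_lines_alt (text : String) : List String :=
  pvCollect ((PySem.Str.split? (PySem.Str.replace text "\r\n" "\n") "\n").getD []) 24

-- ===== PRECONDITION & SPEC =====
def Spec_parse_callref_lines (text : String) (out : List String) : Prop := out = parse_callref_lines_alt text
instance (text : String) (out : List String) : Decidable (Spec_parse_callref_lines text out) := by unfold Spec_parse_callref_lines; infer_instance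

-- ===== CLAIM (what is proved, stated in full; the proofs are below) =====
def Claim_equal_parse_callref_lines : Prop := ∀ (text : String), Dom_parse_callref_lines text → Spec_parse_callref_lines text (parse_callref_lines text)

-- ===== LEMMAS AND PROOFS =====

-- A's first loop, as a filter over the rstripped lines
theorem useful_foldl (l : List String) (acc : List String) :
    l.foldl
      (fun lines raw_line =>
        let line := PySem.Str.rstrip raw_line
        if line == "" then lines
        else if PySem.Str.startswith line "INFO " then lines
        else if PySem.Str.startswith line "Press any key" then lines
        else lines ++ [line]) acc
    = acc ++ (l.map PySem.Str.rstrip).filter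
        (fun s => !(s == "") && !(PySem.Str.startswith s "INFO ")
          && !(PySem.Str.startswith s "Press any key")) := by
  induction l generalizing acc with
  | nil => simp
  | cons x xs ih =>
    rw [List.foldl_cons, ih]
    simp only [List.map_cons, List.filter_cons]
    split_ifs <;> simp_all

-- B's loop computes take k of the combined filter (for k ≥ 1)
theorem pvCollect_eq (l : List String) (k : Nat) (hk : 1 ≤ k) :
    pvCollect l k = ((l.map PySem.Str.rstrip).filter (fun s => !pvSkip s)).take k := by
  induction l generalizing k with
  | nil => simp [pvCollect]
  | cons x xs ih =>
    obtain ⟨m, rfl⟩ : ∃ m, k = m + 1 := ⟨k - 1, by omega⟩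
    simp only [pvCollect, List.map_cons, List.filter_cons]
    by_cases h : pvSkip (PySem.Str.rstrip x) = true
    · simp only [h, if_true, ih (m + 1) hk, Bool.not_true, Bool.false_eq_true, if_false]
    · by_cases hm : m = 0
      · subst hm; simp [h]
      · have hne : ¬ (m + 1 = 1) := by omega
        simp only [hne, if_false, ih m (by omega), h, Bool.not_false, if_true,
          Bool.false_eq_true, Nat.add_sub_cancel, List.take_succ_cons]

-- ===== VERDICT (by name: the statement is the Claim_ definition above) =====
set_option maxHeartbeats 1000000 in
theorem parse_callref_lines_spec : Claim_equal_parse_callref_lines := by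
  intro text _
  show parse_callref_lines text = parse_callref_lines_alt text
  unfold parse_callref_lines parse_callref_lines_alt useful_log_lines
  rw [useful_foldl, pvCollect_eq _ 24 (by omega)]
  simp only [List.nil_append]
  rw [PySem.List.slice_to _ (b := 24) (by norm_num)]
  simp only [List.filter_filter, Int.reduceToNat]
  congr 1
  apply List.filter_congr
  intro s _
  simp only [pvSkip]
  cases h1 : s == "" <;>
    cases h2 : PySem.Str.startswith s "INFO " <;>
    cases h3 : PySem.Str.startswith s "Press any key" <;>
    cases h4 : PySem.Str.startswith s "Function:" <;>
    cases h5 : PySem.Str.startswith s "Target:" <;>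
    cases h6 : PySem.Str.isIn "GhidraScript" s <;> rfl
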